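-- pv_equiv track=rewrite | github.com/joie-zhang/bargain | negotiation/json_repair.py | _strip_comments_and_markdown
-- ===== SOURCE A (Python) =====
-- from typing import Any, Dict, List, Optional
--
-- def _strip_comments_and_markdown(candidate: str) -> str:
--     """Strip comments and simple markdown emphasis outside JSON strings."""
--     output: List[str] = []
--     in_string = False
--     escaped = False
--     i = 0
--     while i < len(candidate):
--         char = candidate[i]
--         next_char = candidate[i + 1] if i + 1 < len(candidate) else ""
--
--         if in_string:
--             output.append(char)
--             if escaped:
--                 escaped = False
--             elif char == "\\":
--                 escaped = True
--             elif char == '"':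
--                 in_string = False
--             i += 1
--             continue
--
--         if char == '"':
--             output.append(char)
--             in_string = True
--             i += 1
--             continue
--
--         if char == "/" and next_char == "/":
--             i += 2
--             while i < len(candidate) and candidate[i] not in "\r\n":
--                 i += 1
--             continue
--
--         if char == "/" and next_char == "*":
--             i += 2
--             while i + 1 < len(candidate) and not (candidate[i] == "*" and candidate[i + 1] == "/"):
--                 i += 1
--             i = min(len(candidate), i + 2)
--             continue
--
--         if char == "*" and next_char == "*":
--             i += 2
--             continue
--
--         output.append(char)
--         i += 1
--
--     return "".join(output)
-- ===== SOURCE B (Python) =====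
-- import re
--
-- # One regex alternation, tried in priority order at each position: string literal,
-- # line comment, block comment (lazy, falling back to end-of-input), markdown '**'.
-- _TOKEN = re.compile(r'"(?:\\.|[^"\\])*"?|//[^\r\n]*|/\*.*?(?:\*/|\Z)|\*\*', re.DOTALL)
--
-- def _strip_comments_and_markdown(candidate: str) -> str:
--     out = []
--     pos = 0
--     for m in _TOKEN.finditer(candidate):
--         out.append(candidate[pos:m.start()])   # unmatched gap text, kept verbatim
--         if m.group().startswith('"'):          # string literals are kept,
--             out.append(m.group())              # comments and ** are dropped
--         pos = m.end()
--     out.append(candidate[pos:])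
--     return ''.join(out)
-- ===== Notes on version B (the rewrite author's own statement) =====
-- stated objective: idiomatic
-- what changed: Replaces the hand-stepped in_string/escaped character state machine with a single compiled regex alternation (string literal, line comment, block comment, '**') walked via re.finditer, keeping gap text and string tokens and dropping the rest. The compiled regex scans in C instead of per-character Python stepping.
import Mathlib
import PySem

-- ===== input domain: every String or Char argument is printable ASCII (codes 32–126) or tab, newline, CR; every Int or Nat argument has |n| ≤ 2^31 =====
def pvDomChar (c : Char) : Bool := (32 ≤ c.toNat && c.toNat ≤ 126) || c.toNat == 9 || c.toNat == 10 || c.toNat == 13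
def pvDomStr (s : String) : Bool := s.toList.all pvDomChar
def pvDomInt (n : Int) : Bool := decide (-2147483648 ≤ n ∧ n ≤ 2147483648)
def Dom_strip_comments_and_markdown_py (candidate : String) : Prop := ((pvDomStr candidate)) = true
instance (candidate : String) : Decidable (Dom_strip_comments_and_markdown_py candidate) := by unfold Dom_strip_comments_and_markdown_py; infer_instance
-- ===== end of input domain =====

-- B replaces A's hand-stepped in_string/escaped state machine by a regex-finditer
-- walk over a prioritized token alternation (string literal / line comment /
-- block comment / '**'), keeping gap text and string tokens and dropping the
-- rest; objective: idiomatic. Same return value; neither mutates anything.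

-- ===== PORT A =====
def pvA_skipLine : List Char → List Char
  | [] => []
  | c :: rest => if c = '\r' ∨ c = '\n' then c :: rest else pvA_skipLine rest

def pvA_skipBlock : List Char → List Char
  | [] => []
  | [_] => []
  | a :: b :: rest => if a = '*' ∧ b = '/' then rest else pvA_skipBlock (b :: rest)

-- length bounds used only for the ports' termination
theorem pvA_skipLine_len : ∀ l : List Char, (pvA_skipLine l).length ≤ l.length := by
  intro l; induction l <;> simp_all [pvA_skipLine] <;> split <;> simp_all <;> omega

theorem pvA_skipBlock_len : ∀ l : List Char, (pvA_skipBlock l).length ≤ l.length := by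
  intro l
  induction l using pvA_skipBlock.induct <;> simp_all [pvA_skipBlock] <;>
    first | omega | (split <;> simp_all <;> omega)

theorem pv_tail_le (l : List Char) : l.tail.length ≤ l.length := by
  cases l <;> simp

def pvA_loop : List Char → Bool → Bool → List Char
  | [], _, _ => []
  | c :: rest, inStr, esc =>
    if inStr then
      c :: (if esc then pvA_loop rest true false
            else if c = '\\' then pvA_loop rest true true
            else if c = '"' then pvA_loop rest false false
            else pvA_loop rest true false)
    else if c = '"' then c :: pvA_loop rest true esc
    else if c = '/' ∧ rest.head? = some '/' then pvA_loop (pvA_skipLine rest.tail) false esc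
    else if c = '/' ∧ rest.head? = some '*' then pvA_loop (pvA_skipBlock rest.tail) false esc
    else if c = '*' ∧ rest.head? = some '*' then pvA_loop rest.tail false esc
    else c :: pvA_loop rest false esc
termination_by l _ _ => l.length
decreasing_by
  all_goals
    (have h1 := pvA_skipLine_len rest.tail
     have h2 := pvA_skipBlock_len rest.tail
     have h3 := pv_tail_le rest
     simp only [List.length_cons]; omega)

def strip_comments_and_markdown_py (candidate : String) : String :=
  String.ofList (pvA_loop candidate.toList false false)

-- ===== PORT B =====
def pvB_strBody : List Char → List Char × List Char
  | [] => ([], [])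
  | c :: rest =>
    if c = '\\' then
      match rest with
      | [] => ([], [c])                 -- no alternative matches a lone trailing backslash
      | d :: r => let (t, rr) := pvB_strBody r; (c :: d :: t, rr)   -- `\\.`
    else if c = '"' then (['"'], rest)  -- the optional closing `"?`
    else let (t, r) := pvB_strBody rest; (c :: t, r)   -- `[^"\\]`

def pvB_lineTail : List Char → List Char
  | [] => []
  | c :: rest => if c = '\r' ∨ c = '\n' then c :: rest else pvB_lineTail rest

def pvB_blockTail : List Char → List Char
  | [] => []
  | c :: rest =>
    if c = '*' ∧ rest.head? = some '/' then rest.tail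
    else pvB_blockTail rest

-- length bounds used only for pvB_scan's termination
theorem pvB_strBody_len : ∀ l : List Char, (pvB_strBody l).2.length ≤ l.length := by
  have key : ∀ n (l : List Char), l.length ≤ n → (pvB_strBody l).2.length ≤ l.length := by
    intro n
    induction n with
    | zero => intro l h; cases l with | nil => simp [pvB_strBody] | cons => simp at h
    | succ n ih =>
      intro l hl
      cases l with
      | nil => simp [pvB_strBody]
      | cons c rest =>
        simp only [List.length_cons] at hl
        by_cases hb : c = '\\'
        · subst hb
          cases rest with
          | nil => simp [pvB_strBody]
          | cons d r =>
            have := ih r (by simp at hl ⊢; omega)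
            simp [pvB_strBody]; omega
        · by_cases hq : c = '"'
          · subst hq; rw [pvB_strBody.eq_def]; simp
          · have := ih rest (by omega)
            rw [pvB_strBody.eq_def]
            simp [hb, hq]; omega
  intro l; exact key l.length l le_rfl

theorem pvB_lineTail_len : ∀ l : List Char, (pvB_lineTail l).length ≤ l.length := by
  intro l; induction l <;> simp_all [pvB_lineTail] <;> split <;> simp_all <;> omega

theorem pvB_blockTail_len : ∀ l : List Char, (pvB_blockTail l).length ≤ l.length := by
  intro l
  induction l with
  | nil => simp [pvB_blockTail]
  | cons c rest ih =>
    simp only [pvB_blockTail]; split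
    · have := pv_tail_le rest; simp; omega
    · simp; omega

def pvB_scan : List Char → List Char
  | [] => []
  | c :: rest =>
    if c = '"' then '"' :: (pvB_strBody rest).1 ++ pvB_scan (pvB_strBody rest).2
    else if c = '/' ∧ rest.head? = some '/' then pvB_scan (pvB_lineTail rest.tail)
    else if c = '/' ∧ rest.head? = some '*' then pvB_scan (pvB_blockTail rest.tail)
    else if c = '*' ∧ rest.head? = some '*' then pvB_scan rest.tail
    else c :: pvB_scan rest
termination_by l => l.length
decreasing_by
  all_goals
    (have h1 := pvB_strBody_len rest
     have h2 := pvB_lineTail_len rest.tail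
     have h3 := pvB_blockTail_len rest.tail
     have h4 := pv_tail_le rest
     simp only [List.length_cons]; omega)

def strip_comments_and_markdown_py_alt (candidate : String) : String :=
  String.ofList (pvB_scan candidate.toList)

-- ===== PRECONDITION & SPEC =====
def Spec_strip_comments_and_markdown_py (candidate : String) (out : String) : Prop := out = strip_comments_and_markdown_py_alt candidate
instance (candidate : String) (out : String) : Decidable (Spec_strip_comments_and_markdown_py candidate out) := by unfold Spec_strip_comments_and_markdown_py; infer_instance

-- ===== CLAIM (what is proved, stated in full; the proofs are below) =====
def Claim_equal_strip_comments_and_markdown_py : Prop := ∀ (candidate : String), Dom_strip_comments_and_markdown_py candidate → Spec_strip_comments_and_markdown_py candidate (strip_comments_and_markdown_py candidate)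

-- ===== LEMMAS AND PROOFS =====
-- step (equation) lemmas for the two ports

theorem strBody_nil : pvB_strBody [] = ([], []) := rfl

theorem strBody_bs_nil : pvB_strBody ['\\'] = ([], ['\\']) := by simp [pvB_strBody]

theorem strBody_bs (d : Char) (r : List Char) :
    pvB_strBody ('\\' :: d :: r)
      = ('\\' :: d :: (pvB_strBody r).1, (pvB_strBody r).2) := by simp [pvB_strBody]

theorem strBody_q (r : List Char) : pvB_strBody ('"' :: r) = (['"'], r) := by
  rw [pvB_strBody.eq_def]; simp

theorem strBody_other (c : Char) (r : List Char) (h1 : c ≠ '\\') (h2 : c ≠ '"') :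
    pvB_strBody (c :: r) = (c :: (pvB_strBody r).1, (pvB_strBody r).2) := by
  rw [pvB_strBody.eq_def]; simp [h1, h2]

-- step lemmas for pvA_loop

theorem A_nil (inStr esc : Bool) : pvA_loop [] inStr esc = [] := by simp [pvA_loop]

theorem A_str_esc (c : Char) (rest : List Char) :
    pvA_loop (c :: rest) true true = c :: pvA_loop rest true false := by simp [pvA_loop]

theorem A_str_bs (rest : List Char) :
    pvA_loop ('\\' :: rest) true false = '\\' :: pvA_loop rest true true := by simp [pvA_loop]

theorem A_str_q (rest : List Char) :
    pvA_loop ('"' :: rest) true false = '"' :: pvA_loop rest false false := by simp [pvA_loop]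

theorem A_str_other (c : Char) (rest : List Char) (h1 : c ≠ '\\') (h2 : c ≠ '"') :
    pvA_loop (c :: rest) true false = c :: pvA_loop rest true false := by
  simp [pvA_loop, h1, h2]

theorem A_out_q (rest : List Char) (esc : Bool) :
    pvA_loop ('"' :: rest) false esc = '"' :: pvA_loop rest true esc := by simp [pvA_loop]

theorem A_out_line (c : Char) (rest : List Char) (esc : Bool)
    (h : c = '/' ∧ rest.head? = some '/') :
    pvA_loop (c :: rest) false esc = pvA_loop (pvA_skipLine rest.tail) false esc := by
  simp [pvA_loop, h.1, h.2, h]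

theorem A_out_block (c : Char) (rest : List Char) (esc : Bool)
    (h : c = '/' ∧ rest.head? = some '*') :
    pvA_loop (c :: rest) false esc = pvA_loop (pvA_skipBlock rest.tail) false esc := by
  have h2 : ¬ (c = '/' ∧ rest.head? = some '/') := by simp [h.2]
  simp [pvA_loop, h.1, h, h2]

theorem A_out_star (c : Char) (rest : List Char) (esc : Bool)
    (h : c = '*' ∧ rest.head? = some '*') :
    pvA_loop (c :: rest) false esc = pvA_loop rest.tail false esc := by
  have h1 : c ≠ '"' := by simp [h.1]
  have h2 : ¬ (c = '/' ∧ rest.head? = some '/') := by simp [h.1]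
  have h3 : ¬ (c = '/' ∧ rest.head? = some '*') := by simp [h.1]
  simp [pvA_loop, h1, h2, h3, h]

theorem A_out_other (c : Char) (rest : List Char) (esc : Bool)
    (h1 : c ≠ '"') (h2 : ¬ (c = '/' ∧ rest.head? = some '/'))
    (h3 : ¬ (c = '/' ∧ rest.head? = some '*')) (h4 : ¬ (c = '*' ∧ rest.head? = some '*')) :
    pvA_loop (c :: rest) false esc = c :: pvA_loop rest false esc := by
  simp [pvA_loop, h1, h2, h3, h4]

-- step lemmas for pvB_scan

theorem B_q (rest : List Char) :
    pvB_scan ('"' :: rest)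
      = '"' :: (pvB_strBody rest).1 ++ pvB_scan (pvB_strBody rest).2 := by simp [pvB_scan]

theorem B_line (c : Char) (rest : List Char) (h : c = '/' ∧ rest.head? = some '/') :
    pvB_scan (c :: rest) = pvB_scan (pvB_lineTail rest.tail) := by
  simp [pvB_scan, h.1, h.2, h]

theorem B_block (c : Char) (rest : List Char) (h : c = '/' ∧ rest.head? = some '*') :
    pvB_scan (c :: rest) = pvB_scan (pvB_blockTail rest.tail) := by
  have h2 : ¬ (c = '/' ∧ rest.head? = some '/') := by simp [h.2]
  simp [pvB_scan, h.1, h, h2]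

theorem B_star (c : Char) (rest : List Char) (h : c = '*' ∧ rest.head? = some '*') :
    pvB_scan (c :: rest) = pvB_scan rest.tail := by
  have h1 : c ≠ '"' := by simp [h.1]
  have h2 : ¬ (c = '/' ∧ rest.head? = some '/') := by simp [h.1]
  have h3 : ¬ (c = '/' ∧ rest.head? = some '*') := by simp [h.1]
  simp [pvB_scan, h1, h2, h3, h]

theorem B_other (c : Char) (rest : List Char)
    (h1 : c ≠ '"') (h2 : ¬ (c = '/' ∧ rest.head? = some '/'))
    (h3 : ¬ (c = '/' ∧ rest.head? = some '*')) (h4 : ¬ (c = '*' ∧ rest.head? = some '*')) :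
    pvB_scan (c :: rest) = c :: pvB_scan rest := by
  simp [pvB_scan, h1, h2, h3, h4]

-- in a string, A's flag-stepping yields B's string token followed by A restarted

theorem inString_eq : ∀ l : List Char,
    pvA_loop l true false
      = (pvB_strBody l).1 ++ pvA_loop (pvB_strBody l).2 false false := by
  have key : ∀ n (l : List Char), l.length ≤ n →
      pvA_loop l true false
        = (pvB_strBody l).1 ++ pvA_loop (pvB_strBody l).2 false false := by
    intro n
    induction n with
    | zero => intro l h; cases l with
      | nil => simp [strBody_nil, A_nil]
      | cons => simp at h
    | succ n ih =>
      intro l hl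
      cases l with
      | nil => simp [strBody_nil, A_nil]
      | cons c rest =>
        simp only [List.length_cons] at hl
        by_cases hb : c = '\\'
        · subst hb
          cases rest with
          | nil =>
            rw [A_str_bs]
            simp [A_nil, strBody_bs_nil, pvA_loop]
          | cons d r =>
            rw [A_str_bs, A_str_esc, strBody_bs, ih r (by simp at hl ⊢; omega)]
            simp
        · by_cases hq : c = '"'
          · subst hq; rw [A_str_q, strBody_q]; simp
          · rw [A_str_other c rest hb hq, strBody_other c rest hb hq,
                ih rest (by omega)]
            simp
  intro l; exact key l.length l le_rfl

theorem skipLine_eq : ∀ l : List Char, pvA_skipLine l = pvB_lineTail l := by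
  intro l; induction l <;> simp_all [pvA_skipLine, pvB_lineTail]

theorem skipBlock_eq : ∀ l : List Char, pvA_skipBlock l = pvB_blockTail l := by
  intro l
  induction l using pvA_skipBlock.induct with
  | case1 => rfl
  | case2 a => simp [pvA_skipBlock, pvB_blockTail]
  | case3 a b rest h =>
    obtain ⟨h1, h2⟩ := h; subst h1; subst h2; simp [pvA_skipBlock, pvB_blockTail]
  | case4 a b rest h ih =>
    rw [show pvA_skipBlock (a :: b :: rest) = pvA_skipBlock (b :: rest) from by
          simp only [pvA_skipBlock]; rw [if_neg (by tauto)],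
        show pvB_blockTail (a :: b :: rest) = pvB_blockTail (b :: rest) from by
          simp only [pvB_blockTail]
          rw [if_neg (by simp only [List.head?_cons, Option.some.injEq]; tauto)]]
    exact ih

theorem main_eq : ∀ l : List Char, pvA_loop l false false = pvB_scan l := by
  have key : ∀ n (l : List Char), l.length ≤ n → pvA_loop l false false = pvB_scan l := by
    intro n
    induction n with
    | zero => intro l h; cases l with
      | nil => simp [A_nil, pvB_scan]
      | cons => simp at h
    | succ n ih =>
      intro l hl
      cases l with
      | nil => simp [A_nil, pvB_scan]
      | cons c rest =>
        simp only [List.length_cons] at hl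
        by_cases hq : c = '"'
        · subst hq
          rw [A_out_q, B_q, inString_eq,
            ih _ (le_trans (pvB_strBody_len rest) (by omega))]
          rfl
        · by_cases hll : c = '/' ∧ rest.head? = some '/'
          · rw [A_out_line c rest false hll, B_line c rest hll, skipLine_eq,
              ih _ (le_trans (pvB_lineTail_len rest.tail) (le_trans (pv_tail_le rest) (by omega)))]
          · by_cases hbb : c = '/' ∧ rest.head? = some '*'
            · rw [A_out_block c rest false hbb, B_block c rest hbb, skipBlock_eq,
                ih _ (le_trans (pvB_blockTail_len rest.tail) (le_trans (pv_tail_le rest) (by omega)))]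
            · by_cases hss : c = '*' ∧ rest.head? = some '*'
              · rw [A_out_star c rest false hss, B_star c rest hss,
                  ih _ (le_trans (pv_tail_le rest) (by omega))]
              · rw [A_out_other c rest false hq hll hbb hss, B_other c rest hq hll hbb hss,
                  ih _ (by omega)]
  intro l; exact key l.length l le_rfl

-- ===== VERDICT (by name: the statement is the Claim_ definition above) =====
theorem strip_comments_and_markdown_py_spec : Claim_equal_strip_comments_and_markdown_py := by
  intro c _
  unfold Spec_strip_comments_and_markdown_py strip_comments_and_markdown_py strip_comments_and_markdown_py_alt
  rw [main_eq]
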